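-- pv_equiv track=rewrite | github.com/port-labs/ocean | integrations/harbor/mappers/projects.py | _deduplicate_roles
-- ===== SOURCE A (Python) =====
-- def _deduplicate_roles(roles: list[dict[str, str]]) -> list[dict[str, str]]:
--     seen: set[tuple[str, str]] = set()
--     deduped: list[dict[str, str]] = []
--     for role in roles:
--         username = role.get("username")
--         role_name = role.get("role", "")
--         if not username:
--             continue
--         key = (username, role_name)
--         if key in seen:
--             continue
--         seen.add(key)
--         deduped.append({"username": username, "role": role_name})
--     deduped.sort(key=lambda value: (value.get("username", ""), value.get("role", "")))
--     return deduped
-- ===== SOURCE B (Python) =====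
-- def _deduplicate_roles(roles):
--     pairs = []
--     for role in roles:
--         username = role.get("username")
--         if not username:
--             continue
--         pairs.append((username, role.get("role", "")))
--     pairs.sort()
--     deduped = []
--     prev = None
--     for pair in pairs:
--         if prev == pair:
--             continue
--         prev = pair
--         deduped.append({"username": pair[0], "role": pair[1]})
--     return deduped
-- ===== Notes on version B (the rewrite author's own statement) =====
-- stated objective: alternative
-- what changed: Replaces the seen-set membership dedup followed by a key-function sort of dicts with: collect (username, role) pairs, sort the pairs, then deduplicate by adjacency in one pass with a previous-key variable.
import Mathlib
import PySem

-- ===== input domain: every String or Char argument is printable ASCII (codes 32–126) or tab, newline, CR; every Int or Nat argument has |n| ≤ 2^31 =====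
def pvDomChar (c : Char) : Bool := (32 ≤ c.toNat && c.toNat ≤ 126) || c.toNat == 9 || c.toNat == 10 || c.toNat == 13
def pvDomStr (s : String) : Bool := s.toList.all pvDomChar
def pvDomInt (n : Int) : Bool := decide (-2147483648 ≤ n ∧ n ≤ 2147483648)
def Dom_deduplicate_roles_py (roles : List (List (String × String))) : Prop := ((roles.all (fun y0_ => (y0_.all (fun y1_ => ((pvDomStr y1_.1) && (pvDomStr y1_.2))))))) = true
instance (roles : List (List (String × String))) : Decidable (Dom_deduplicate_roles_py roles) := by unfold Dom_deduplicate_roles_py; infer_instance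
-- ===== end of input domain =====

-- B replaces A's seen-set dedup + key-sort of dicts by: collect (username, role) pairs,
-- sort the pairs, then deduplicate by adjacency with a previous-key variable (alternative decomposition, same cost).


-- ===== PORT A =====
-- one loop step of A: skip falsy username, skip seen keys, else record key and append the dict
def pvStepA (st : PySem.Set (String × String) × List (List (String × String)))
    (role : List (String × String)) :
    PySem.Set (String × String) × List (List (String × String)) :=
  let username := PySem.Dict.get? (PySem.Dict.mk role) "username"
  let role_name := PySem.Dict.getD (PySem.Dict.mk role) "role" ""
  match username with
  | none => st
  | some u =>
    if u = "" then st
    else if st.1.contains (u, role_name) then st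
    else (st.1.add (u, role_name), st.2 ++ [[("username", u), ("role", role_name)]])

def deduplicate_roles_py (roles : List (List (String × String))) : List (List (String × String)) :=
  let st := roles.foldl pvStepA (PySem.Set.empty, [])
  PySem.List.sorted2 st.2
    (fun v => PySem.Dict.getD (PySem.Dict.mk v) "username" "")
    (fun v => PySem.Dict.getD (PySem.Dict.mk v) "role" "")

-- ===== PORT B =====
def deduplicate_roles_py_alt (roles : List (List (String × String))) : List (List (String × String)) :=
  let pairs := roles.foldl (fun (acc : List (String × String)) role =>
    match PySem.Dict.get? (PySem.Dict.mk role) "username" with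
    | none => acc
    | some u =>
      if u = "" then acc
      else acc ++ [(u, PySem.Dict.getD (PySem.Dict.mk role) "role" "")]) []
  let sortedPairs := PySem.List.sorted2 pairs (fun p => p.1) (fun p => p.2)
  (sortedPairs.foldl (fun (acc : Option (String × String) × List (List (String × String))) pair =>
      if acc.1 = some pair then acc
      else (some pair, acc.2 ++ [[("username", pair.1), ("role", pair.2)]])) (none, [])).2

-- ===== PRECONDITION & SPEC =====
def Spec_deduplicate_roles_py (roles : List (List (String × String))) (out : List (List (String × String))) : Prop := out = deduplicate_roles_py_alt roles
instance (roles : List (List (String × String))) (out : List (List (String × String))) : Decidable (Spec_deduplicate_roles_py roles out) := by unfold Spec_deduplicate_roles_py; infer_instance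

-- ===== CLAIM (what is proved, stated in full; the proofs are below) =====
def Claim_equal_deduplicate_roles_py : Prop := ∀ (roles : List (List (String × String))), Dom_deduplicate_roles_py roles → Spec_deduplicate_roles_py roles (deduplicate_roles_py roles)

-- ===== LEMMAS AND PROOFS =====

-- the (username, role) key a role contributes, or none if it is filtered out
def pvPair (role : List (String × String)) : Option (String × String) :=
  match PySem.Dict.get? (PySem.Dict.mk role) "username" with
  | none => none
  | some u => if u = "" then none else some (u, PySem.Dict.getD (PySem.Dict.mk role) "role" "")

def pvToDict (p : String × String) : List (String × String) := [("username", p.1), ("role", p.2)]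

-- adjacency dedup at the level of pairs (pure model of B's second loop)
def pvGo (prev : Option (String × String)) : List (String × String) → List (String × String)
  | [] => []
  | p :: t => if prev = some p then pvGo prev t else p :: pvGo (some p) t

theorem pvToDict_key1 (p : String × String) :
    PySem.Dict.getD (PySem.Dict.mk (pvToDict p)) "username" "" = p.1 := rfl

theorem pvToDict_key2 (p : String × String) :
    PySem.Dict.getD (PySem.Dict.mk (pvToDict p)) "role" "" = p.2 := rfl

-- sorted2 is sorted under the lexicographic tuple key
theorem pv_sorted2_eq_sorted_lex {α : Type} (xs : List α) (k1 k2 : α → String) :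
    PySem.List.sorted2 xs k1 k2 = PySem.List.sorted xs (fun x => toLex (k1 x, k2 x)) := by
  have hb : (fun (a b : α) => (decide (k1 a < k1 b) || (!decide (k1 b < k1 a) && decide (k2 a < k2 b))))
      = (fun (a b : α) => decide (toLex (k1 a, k2 a) < toLex (k1 b, k2 b))) := by
    funext a b
    have hiff : (toLex (k1 a, k2 a) < toLex (k1 b, k2 b)) ↔
        (k1 a < k1 b ∨ (¬ k1 b < k1 a ∧ k2 a < k2 b)) := by
      rw [Prod.Lex.lt_iff]
      constructor
      · rintro (h | ⟨h, h2⟩)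
        · exact Or.inl h
        · exact Or.inr ⟨by simp_all, by simpa using h2⟩
      · rintro (h | ⟨h, h2⟩)
        · exact Or.inl h
        · rcases lt_trichotomy (k1 a) (k1 b) with h1 | h1 | h1
          · exact Or.inl h1
          · exact Or.inr ⟨h1, h2⟩
          · exact absurd h1 h
    have hA : (decide (k1 a < k1 b) || (!decide (k1 b < k1 a) && decide (k2 a < k2 b)))
        = decide (k1 a < k1 b ∨ (¬ (k1 b < k1 a) ∧ k2 a < k2 b)) := by
      simp only [Bool.decide_or, Bool.decide_and, decide_not]
    rw [hA]
    exact decide_eq_decide.mpr hiff.symm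
  have h2 : PySem.List.sorted2 xs k1 k2
      = xs.foldl (fun acc x => PySem.List.insertBy
          (fun a b => (decide (k1 a < k1 b) || (!decide (k1 b < k1 a) && decide (k2 a < k2 b)))) x acc) [] := rfl
  rw [h2, PySem.List.sorted_eq_foldl_insertBy, hb]

-- A's loop, in closed form: seen = set of keys so far, deduped = first occurrences, as dicts
theorem pvA_loop (roles : List (List (String × String))) (P0 : List (String × String)) :
    roles.foldl pvStepA (PySem.Set.ofList P0, (PySem.List.dedup P0).map pvToDict)
      = (PySem.Set.ofList (P0 ++ roles.filterMap pvPair),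
         (PySem.List.dedup (P0 ++ roles.filterMap pvPair)).map pvToDict) := by
  induction roles generalizing P0 with
  | nil => simp
  | cons role rest ih =>
    simp only [List.foldl_cons, List.filterMap_cons]
    have hstep : pvStepA (PySem.Set.ofList P0, (PySem.List.dedup P0).map pvToDict) role
        = (PySem.Set.ofList (P0 ++ (pvPair role).toList),
           (PySem.List.dedup (P0 ++ (pvPair role).toList)).map pvToDict) := by
      unfold pvStepA pvPair
      cases hu : PySem.Dict.get? (PySem.Dict.mk role) "username" with
      | none => simp
      | some u =>
        by_cases hu0 : u = ""
        · simp [hu0]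
        · simp only [hu0]
          set p : String × String := (u, PySem.Dict.getD (PySem.Dict.mk role) "role" "") with hp
          have hof : PySem.Set.ofList (P0 ++ [p]) = (PySem.Set.ofList P0).add p := by
            simp [PySem.Set.ofList]
          by_cases hm : (PySem.Set.ofList P0).contains p
          · have hmem : p ∈ P0 := by simpa using hm
            have hmem' : (u, (PySem.Dict.mk role).getD "role" "") ∈ P0 := by
              rw [← hp]; exact hmem
            have e1 : PySem.Set.ofList (P0 ++ [p]) = PySem.Set.ofList P0 := by
              rw [hof]; simp [PySem.Set.add, hmem]
            have e2 : PySem.List.dedup (P0 ++ [p]) = PySem.List.dedup P0 := by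
              rw [PySem.List.dedup_eq_ofList, PySem.List.dedup_eq_ofList, e1]
            simp [e1, hmem]
          · have hmem : p ∉ P0 := by simpa using hm
            have hmem' : (u, (PySem.Dict.mk role).getD "role" "") ∉ P0 := by
              rw [← hp]; exact hmem
            have e1 : PySem.Set.ofList (P0 ++ [p]) = PySem.Set.ofList P0 ++ [p] := by
              rw [hof]; simp [PySem.Set.add, hmem]
            simp [PySem.Set.add, hmem]
            rw [hp] at e1
            constructor
            · rw [e1]
            · rw [e1, List.map_append]; rfl
    rw [hstep]
    cases h : pvPair role with
    | none => simpa [h] using ih P0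
    | some p => simpa [h, List.append_assoc] using ih (P0 ++ [p])

-- B's first loop collects exactly the pvPair stream
theorem pvB_pairs (roles : List (List (String × String))) (acc : List (String × String)) :
    roles.foldl (fun (acc : List (String × String)) role =>
      match PySem.Dict.get? (PySem.Dict.mk role) "username" with
      | none => acc
      | some u =>
        if u = "" then acc
        else acc ++ [(u, PySem.Dict.getD (PySem.Dict.mk role) "role" "")]) acc
      = acc ++ roles.filterMap pvPair := by
  induction roles generalizing acc with
  | nil => simp
  | cons role rest ih =>
    simp only [List.foldl_cons, List.filterMap_cons]
    unfold pvPair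
    cases hu : PySem.Dict.get? (PySem.Dict.mk role) "username" with
    | none => simpa using ih acc
    | some u =>
      by_cases hu0 : u = ""
      · simpa [hu0] using ih acc
      · simpa [hu0, List.append_assoc] using ih (acc ++ [(u, PySem.Dict.getD (PySem.Dict.mk role) "role" "")])

-- B's second loop is pvGo followed by pvToDict
theorem pvB_dedup (l : List (String × String)) (prev : Option (String × String))
    (out : List (List (String × String))) :
    (l.foldl (fun (acc : Option (String × String) × List (List (String × String))) pair =>
      if acc.1 = some pair then acc
      else (some pair, acc.2 ++ [[("username", pair.1), ("role", pair.2)]])) (prev, out)).2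
      = out ++ (pvGo prev l).map pvToDict := by
  induction l generalizing prev out with
  | nil => simp [pvGo]
  | cons p t ih =>
    simp only [List.foldl_cons, pvGo]
    by_cases h : prev = some p
    · simpa [h] using ih prev out
    · simpa [h, pvToDict, List.append_assoc] using ih (some p) (out ++ [[("username", p.1), ("role", p.2)]])

-- pvGo on a ≤-sorted list: membership (minus the running previous key) and strict sortedness
theorem pvGo_spec (l : List (String × String)) (prev : Option (String × String))
    (hs : l.Pairwise (fun a b => toLex a ≤ toLex b))
    (hp : ∀ x ∈ l, ∀ q, prev = some q → toLex q ≤ toLex x) :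
    (∀ x, x ∈ pvGo prev l ↔ x ∈ l ∧ some x ≠ prev) ∧
      (pvGo prev l).Pairwise (fun a b => toLex a < toLex b) := by
  induction l generalizing prev with
  | nil => simp [pvGo]
  | cons p t ih =>
    have hs' := (List.pairwise_cons.mp hs).2
    have hhead := (List.pairwise_cons.mp hs).1
    by_cases h : prev = some p
    · subst h
      have harg : ∀ x ∈ t, ∀ q, (some p : Option (String × String)) = some q → toLex q ≤ toLex x := by
        intro x hx q hq
        cases hq
        exact hhead x hx
      have := ih (some p) hs' harg
      simp only [pvGo, if_true]
      refine ⟨fun x => ?_, this.2⟩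
      rw [(this.1 x), List.mem_cons]
      constructor
      · rintro ⟨hx, hne⟩; exact ⟨Or.inr hx, hne⟩
      · rintro ⟨hx | hx, hne⟩
        · exact absurd (congrArg some hx) hne
        · exact ⟨hx, hne⟩
    · have harg : ∀ x ∈ t, ∀ q, (some p : Option (String × String)) = some q → toLex q ≤ toLex x := by
        intro x hx q hq
        cases hq
        exact hhead x hx
      have ihp := ih (some p) hs' harg
      simp only [pvGo, if_neg h]
      constructor
      · intro x
        simp only [List.mem_cons, ihp.1 x]
        constructor
        · rintro (rfl | ⟨hx, hne⟩)
          · exact ⟨Or.inl rfl, fun hc => h hc.symm⟩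
          · refine ⟨Or.inr hx, ?_⟩
            intro hc
            rcases prev with _ | q
            · exact absurd hc (by simp)
            · have hqx : q = x := by simpa using hc.symm
              subst hqx
              have h1 : toLex q ≤ toLex p := hp p (List.mem_cons_self ..) q rfl
              have h2 : toLex p ≤ toLex q := hhead q hx
              have hpq : p = q := toLex.injective (le_antisymm h2 h1)
              exact hne (congrArg some hpq.symm)
        · rintro ⟨rfl | hx, hne⟩
          · exact Or.inl rfl
          · by_cases hxp : x = p
            · exact Or.inl hxp
            · exact Or.inr ⟨hx, fun hc => hxp (by simpa using hc)⟩
      · refine List.pairwise_cons.mpr ⟨?_, ihp.2⟩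
        intro y hy
        have hy' := (ihp.1 y).mp hy
        have h1 : toLex p ≤ toLex y := hhead y hy'.1
        have h2 : p ≠ y := by
          intro hc; exact hy'.2 (congrArg some hc.symm)
        exact lt_of_le_of_ne h1 (fun hc => h2 (toLex.injective hc))

-- ===== VERDICT (by name: the statement is the Claim_ definition above) =====
theorem deduplicate_roles_py_spec : Claim_equal_deduplicate_roles_py := by
  intro roles _
  unfold Spec_deduplicate_roles_py deduplicate_roles_py deduplicate_roles_py_alt
  simp only []
  -- name the key objects
  set P := roles.filterMap pvPair with hP
  have hA : roles.foldl pvStepA (PySem.Set.empty, []) =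
      (PySem.Set.ofList P, (PySem.List.dedup P).map pvToDict) := by
    simpa using pvA_loop roles []
  rw [hA, pvB_pairs roles []]
  simp only [List.nil_append]
  rw [pv_sorted2_eq_sorted_lex, pv_sorted2_eq_sorted_lex]
  set S' := PySem.List.sorted P (fun p => toLex (p.1, p.2)) with hS'
  rw [pvB_dedup S' none []]
  simp only [List.nil_append]
  -- facts about S'
  have hSsort : S'.Pairwise (fun a b => toLex a ≤ toLex b) := by
    have := PySem.List.sorted_pairwise P (fun p => toLex (p.1, p.2))
    simpa using this
  have hgo := pvGo_spec S' none hSsort (fun x _ q hq => by cases hq)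
  have hgomem : ∀ x, x ∈ pvGo none S' ↔ x ∈ P := by
    intro x
    rw [hgo.1 x]
    constructor
    · rintro ⟨hx, _⟩
      have : x ∈ S' := hx
      exact (PySem.List.mem_sorted ..).mp this
    · intro hx
      exact ⟨(PySem.List.mem_sorted ..).mpr hx, by simp⟩
  have hgonodup : (pvGo none S').Nodup :=
    hgo.2.imp (fun {a b} hab => ne_of_lt (a := toLex a) hab ∘ congrArg toLex)
  have hperm : ((pvGo none S').map pvToDict).Perm ((PySem.List.dedup P).map pvToDict) := by
    refine List.Perm.map pvToDict ?_
    rw [List.perm_ext_iff_of_nodup hgonodup (PySem.List.nodup_dedup P)]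
    intro a
    rw [hgomem a, PySem.List.mem_dedup]
  have hpw : ((pvGo none S').map pvToDict).Pairwise
      (fun a b => (toLex (PySem.Dict.getD (PySem.Dict.mk a) "username" "", PySem.Dict.getD (PySem.Dict.mk a) "role" ""))
        < (toLex (PySem.Dict.getD (PySem.Dict.mk b) "username" "", PySem.Dict.getD (PySem.Dict.mk b) "role" ""))) := by
    rw [List.pairwise_map]
    refine hgo.2.imp ?_
    intro a b hab
    simpa [pvToDict_key1, pvToDict_key2] using hab
  exact PySem.List.sorted_eq_of_perm_of_pairwise_lt _ _ _ hperm hpw
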